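-- pv_equiv track=rewrite | github.com/pypi-data/pypi-mirror-88 | packages/fhi-vibes/fhi-vibes-1.0.3.tar.gz/fhi-vibes-1.0.3/vibes/fireworks/tasks/postprocess/phonons.py | get_base_work_dir
-- ===== SOURCE A (Python) =====
-- def get_base_work_dir(wd):
--     """Converts wd to be it's base (no task specific directories)
--
--     Parameters
--     ----------
--     wd : str
--         Current working directory
--
--     Returns
--     -------
--     str
--         The base working directory for the workflow
--
--     """
--     wd_list = wd.split("/")
--     # remove analysis directories from path
--     while "phonopy_analysis" in wd_list:
--         wd_list.remove("phonopy_analysis")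
--
--     while "phono3py_analysis" in wd_list:
--         wd_list.remove("phono3py_analysis")
--
--     while "phonopy" in wd_list:
--         wd_list.remove("phonopy")
--
--     while "phono3py" in wd_list:
--         wd_list.remove("phono3py")
--
--     # Remove all "//" from the path
--     while "" in wd_list:
--         wd_list.remove("")
--
--     # If starting from root add / to beginning of the path
--     if wd[0] == "/":
--         wd_list = [""] + wd_list
--
--     # Remove "sc_natoms_???" to get back to the base directory
--     if len(wd_list[-1]) > 10 and wd_list[-1][:10] == "sc_natoms_":
--         return "/".join(wd_list[:-1])
--     return "/".join(wd_list)
-- ===== SOURCE B (Python) =====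
-- def get_base_work_dir(wd):
--     drop = {"phonopy_analysis", "phono3py_analysis", "phonopy", "phono3py", ""}
--     parts = [p for p in wd.split("/") if p not in drop]
--     if wd[0] == "/":
--         parts = [""] + parts
--     last = parts[-1]
--     if last.startswith("sc_natoms_") and len(last) > 10:
--         return "/".join(parts[:-1])
--     return "/".join(parts)
-- ===== Notes on version B (the rewrite author's own statement) =====
-- stated objective: simpler
-- what changed: Replaces A's five sequential while-in/remove scan-and-remove loops with a single filtering pass over the split components that drops any component in the set {'phonopy_analysis','phono3py_analysis','phonopy','phono3py',''}, and uses startswith instead of slice comparison for the sc_natoms_ check.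
-- outside the precondition, e.g. on get_base_work_dir(''): A raises IndexError, B raises IndexError; on get_base_work_dir('phonopy'): A raises IndexError, B raises IndexError; on get_base_work_dir('phonopy_analysis'): A raises IndexError, B raises IndexError
import Mathlib
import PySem

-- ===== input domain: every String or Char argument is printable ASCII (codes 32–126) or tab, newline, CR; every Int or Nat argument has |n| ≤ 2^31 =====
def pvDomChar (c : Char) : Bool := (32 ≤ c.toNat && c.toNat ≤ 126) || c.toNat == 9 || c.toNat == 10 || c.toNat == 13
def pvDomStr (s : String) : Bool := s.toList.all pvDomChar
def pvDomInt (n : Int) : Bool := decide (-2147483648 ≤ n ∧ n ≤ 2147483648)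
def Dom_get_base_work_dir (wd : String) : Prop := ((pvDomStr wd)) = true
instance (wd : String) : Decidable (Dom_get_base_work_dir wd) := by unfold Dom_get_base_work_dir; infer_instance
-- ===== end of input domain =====

-- B replaces A's five sequential while-remove scans with a single filtering pass over the split components; objective: simpler.


-- ===== PORT A =====
-- 'while tok in xs: xs.remove(tok)'  (list.remove erases the first occurrence = List.erase)
def pvRemoveAll (tok : List Char) (xs : List (List Char)) : List (List Char) :=
  if _h : tok ∈ xs then pvRemoveAll tok (xs.erase tok) else xs
termination_by xs.length
decreasing_by
  have h1 := List.length_erase_of_mem _h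
  have h2 := List.length_pos_of_mem _h
  omega

def get_base_work_dir (wd : String) : String :=
  let cs := wd.toList
  let wd_list := PySem.Chars.splitOn cs ['/']
  let wd_list := pvRemoveAll "phonopy_analysis".toList wd_list
  let wd_list := pvRemoveAll "phono3py_analysis".toList wd_list
  let wd_list := pvRemoveAll "phonopy".toList wd_list
  let wd_list := pvRemoveAll "phono3py".toList wd_list
  let wd_list := pvRemoveAll [] wd_list
  -- wd[0] == "/"  (IndexError on empty wd is excluded by Pre_)
  let wd_list := if PySem.Chars.pyGet? cs 0 = some '/' then ([] : List Char) :: wd_list else wd_list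
  match PySem.List.pyGet? wd_list (-1) with
  | none => ""  -- Python raises IndexError here; excluded by Pre_
  | some last =>
    if 10 < PySem.Chars.len last ∧ PySem.List.slice last none (some 10) = "sc_natoms_".toList then
      String.ofList (PySem.Chars.join ['/'] (PySem.List.slice wd_list none (some (-1))))
    else
      String.ofList (PySem.Chars.join ['/'] wd_list)

-- ===== PORT B =====
def get_base_work_dir_alt (wd : String) : String :=
  let drop : PySem.Set (List Char) :=
    PySem.Set.ofList ["phonopy_analysis".toList, "phono3py_analysis".toList,
                      "phonopy".toList, "phono3py".toList, ([] : List Char)]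
  let parts := (PySem.Chars.splitOn wd.toList ['/']).filter (fun p => decide (p ∉ drop))
  let parts := if PySem.Chars.pyGet? wd.toList 0 = some '/' then ([] : List Char) :: parts else parts
  match parts.getLast? with
  | none => ""  -- parts[-1] raises IndexError in Python; excluded by Pre_
  | some last =>
    if PySem.Chars.startswith last "sc_natoms_".toList = true ∧ 10 < PySem.Chars.len last then
      String.ofList (PySem.Chars.join ['/'] parts.dropLast)
    else
      String.ofList (PySem.Chars.join ['/'] parts)

-- ===== PRECONDITION & SPEC =====
-- Pre_ excludes exactly the inputs on which the Python (A and B alike) raises IndexError: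
-- the empty string (wd[0]), and strings not starting with '/' all of whose components are dropped (wd_list[-1]).
def Pre_get_base_work_dir (wd : String) : Prop :=
  wd ≠ "" ∧ (PySem.Chars.pyGet? wd.toList 0 = some '/' ∨
    ∃ p ∈ PySem.Chars.splitOn wd.toList ['/'],
      p ∉ ["phonopy_analysis".toList, "phono3py_analysis".toList,
           "phonopy".toList, "phono3py".toList, ([] : List Char)])
instance (wd : String) : Decidable (Pre_get_base_work_dir wd) := by
  unfold Pre_get_base_work_dir; infer_instance

def pvWitness_get_base_work_dir : String := "/home/u/phonopy/sc_natoms_64"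

def Spec_get_base_work_dir (wd : String) (out : String) : Prop := out = get_base_work_dir_alt wd
instance (wd : String) (out : String) : Decidable (Spec_get_base_work_dir wd out) := by
  unfold Spec_get_base_work_dir; infer_instance

-- ===== CLAIM (what is proved, stated in full; the proofs are below) =====
def Claim_equal_get_base_work_dir : Prop :=
  ∀ (wd : String), Dom_get_base_work_dir wd → Pre_get_base_work_dir wd →
    Spec_get_base_work_dir wd (get_base_work_dir wd)

-- ===== LEMMAS AND PROOFS =====

-- erasing one occurrence of tok does not change a filter that drops tok anyway
theorem pvFilter_erase (tok : List Char) (p : List Char → Bool) (hp : p tok = false) :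
    ∀ xs : List (List Char), (xs.erase tok).filter p = xs.filter p := by
  intro xs
  induction xs with
  | nil => rfl
  | cons y ys ih =>
    by_cases hy : y = tok
    · subst hy
      simp [List.erase_cons_head, hp]
    · rw [List.erase_cons_tail (by simpa using hy)]
      simp [List.filter_cons, ih]

-- the while-remove loop removes every occurrence: it is a filter
theorem pvRemoveAll_eq_filter (tok : List Char) (xs : List (List Char)) :
    pvRemoveAll tok xs = xs.filter (fun x => decide (x ≠ tok)) := by
  fun_induction pvRemoveAll tok xs with
  | case1 xs h ih =>
    rw [ih, pvFilter_erase tok _ (by simp)]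
  | case2 xs h =>
    rw [List.filter_eq_self.mpr]
    intro x hx
    simp
    rintro rfl
    exact h hx

theorem pvChain_eq_filter (l : List (List Char)) :
    pvRemoveAll []
      (pvRemoveAll "phono3py".toList
        (pvRemoveAll "phonopy".toList
          (pvRemoveAll "phono3py_analysis".toList
            (pvRemoveAll "phonopy_analysis".toList l)))) =
    l.filter (fun p => decide (p ∉ ["phonopy_analysis".toList, "phono3py_analysis".toList,
                      "phonopy".toList, "phono3py".toList, ([] : List Char)])) := by
  simp only [pvRemoveAll_eq_filter, List.filter_filter]
  apply List.filter_congr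
  intro x _
  rw [Bool.eq_iff_iff]
  simp [List.mem_cons, not_or]
  tauto

-- the two sc_natoms_ tests agree
theorem pvCond_iff (last : List Char) :
    (10 < PySem.Chars.len last ∧ PySem.List.slice last none (some 10) = "sc_natoms_".toList) ↔
    (PySem.Chars.startswith last "sc_natoms_".toList = true ∧ 10 < PySem.Chars.len last) := by
  rw [PySem.Chars.startswith_iff, List.prefix_iff_eq_take]
  have : PySem.List.slice last none (some 10) = last.take 10 := by
    simpa using PySem.List.slice_to_natCast last 10
  rw [this]
  constructor
  · rintro ⟨h1, h2⟩; exact ⟨by simpa using h2.symm, h1⟩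
  · rintro ⟨h1, h2⟩; exact ⟨h2, by simpa using h1.symm⟩

-- ===== VERDICT (by name: the statement is the Claim_ definition above) =====
theorem get_base_work_dir_spec : Claim_equal_get_base_work_dir := by
  intro wd _ _
  unfold Spec_get_base_work_dir get_base_work_dir get_base_work_dir_alt
  have hdrop : (PySem.Set.ofList ["phonopy_analysis".toList, "phono3py_analysis".toList,
      "phonopy".toList, "phono3py".toList, ([] : List Char)]) =
      ["phonopy_analysis".toList, "phono3py_analysis".toList,
       "phonopy".toList, "phono3py".toList, ([] : List Char)] := by decide
  simp only [pvChain_eq_filter, hdrop]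
  set L := (if PySem.Chars.pyGet? wd.toList 0 = some '/' then
      ([] : List Char) :: (PySem.Chars.splitOn wd.toList ['/']).filter
        (fun p => decide (p ∉ ["phonopy_analysis".toList, "phono3py_analysis".toList,
                      "phonopy".toList, "phono3py".toList, ([] : List Char)]))
    else (PySem.Chars.splitOn wd.toList ['/']).filter
        (fun p => decide (p ∉ ["phonopy_analysis".toList, "phono3py_analysis".toList,
                      "phonopy".toList, "phono3py".toList, ([] : List Char)]))) with hL
  rw [PySem.List.pyGet?_neg_one]
  cases hlast : L.getLast? with
  | none => rfl
  | some last =>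
    dsimp only
    rw [PySem.List.slice_to_neg_one]
    by_cases hc : 10 < PySem.Chars.len last ∧
        PySem.List.slice last none (some 10) = "sc_natoms_".toList
    · rw [if_pos hc, if_pos ((pvCond_iff last).mp hc)]
    · rw [if_neg hc, if_neg (fun h => hc ((pvCond_iff last).mpr h))]
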